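-- pv_equiv track=rewrite | github.com/SangMin-Code/python | Programmers/level2/coupling_delete.py | pracitce
-- ===== SOURCE A (Python) =====
-- def pracitce(s:str)->int:
--     stack = [s[0]]
--     for i in s[1:]:
--         if stack and stack[-1]==i:
--             stack.pop()
--         else:
--             stack.append(i)
--     return 0 if stack else 1
-- ===== SOURCE B (Python) =====
-- def _remove_first_pair(t):
--     for i in range(len(t) - 1):
--         if t[i] == t[i + 1]:
--             return t[:i] + t[i + 2:]
--     return None
--
-- def pracitce(s: str) -> int:
--     t = s
--     while True:
--         u = _remove_first_pair(t)
--         if u is None: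
--             return 1 if t == "" else 0
--         t = u
-- ===== Notes on version B (the rewrite author's own statement) =====
-- stated objective: alternative
-- what changed: B repeatedly deletes the first adjacent equal pair until none remains (fixed-point reduction) and tests emptiness, instead of A's single left-to-right stack pass; B also returns 1 on the empty string where A raises IndexError.
import Mathlib
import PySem

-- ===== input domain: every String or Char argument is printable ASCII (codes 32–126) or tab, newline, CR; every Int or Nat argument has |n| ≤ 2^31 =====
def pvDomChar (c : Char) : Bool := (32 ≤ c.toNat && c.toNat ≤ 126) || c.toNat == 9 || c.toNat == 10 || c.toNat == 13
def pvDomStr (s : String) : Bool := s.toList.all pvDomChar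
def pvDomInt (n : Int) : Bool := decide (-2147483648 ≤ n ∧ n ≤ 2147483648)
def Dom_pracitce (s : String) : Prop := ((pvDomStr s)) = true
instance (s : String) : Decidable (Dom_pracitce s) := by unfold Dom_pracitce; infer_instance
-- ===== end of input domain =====

-- B reduces the string to its pair-free fixed point by repeatedly deleting the first
-- adjacent equal pair, instead of A's one stack pass (objective: alternative, not faster).

-- ===== PORT A =====
-- stack step: "if stack and stack[-1]==i: stack.pop() else: stack.append(i)"
def pvStepA (st : List Char) (i : Char) : List Char :=
  if st ≠ [] ∧ st.getLast? = some i then st.dropLast else st ++ [i]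

def pracitce (s : String) : Int :=
  match s.toList with
  | [] => 0  -- unreachable under Pre_pracitce: Python raises IndexError reading s[0]
  | c :: rest =>
    let stack := rest.foldl pvStepA [c]
    if stack ≠ [] then 0 else 1

-- ===== PORT B =====
-- helper _remove_first_pair: scan for the first adjacent equal pair, remove it (none if no pair)
def pvRed1 : List Char → Option (List Char)
  | [] => none
  | [_] => none
  | a :: b :: t => if a = b then some t else (pvRed1 (b :: t)).map (a :: ·)

-- the while-loop of B, made total with a fuel bound (one deletion strictly shrinks the list,
-- so fuel = length always suffices; the loop itself is unchanged)
def pvReduceAux : Nat → List Char → List Char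
  | 0, l => l
  | n + 1, l =>
    match pvRed1 l with
    | some l' => pvReduceAux n l'
    | none => l

def pvReduceFix (l : List Char) : List Char := pvReduceAux l.length l

def pracitce_alt (s : String) : Int :=
  let t := pvReduceFix s.toList
  if t = [] then 1 else 0

-- ===== PRECONDITION & SPEC =====
-- Pre_ excludes only the empty string, on which A raises IndexError at s[0].
def Pre_pracitce (s : String) : Prop := s ≠ ""
instance (s : String) : Decidable (Pre_pracitce s) := by unfold Pre_pracitce; infer_instance
def pvWitness_pracitce : String := "abba"

def Spec_pracitce (s : String) (out : Int) : Prop := out = pracitce_alt s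
instance (s : String) (out : Int) : Decidable (Spec_pracitce s out) := by unfold Spec_pracitce; infer_instance

-- ===== CLAIM =====
def Claim_equal_pracitce : Prop := ∀ (s : String), Dom_pracitce s → Pre_pracitce s → Spec_pracitce s (pracitce s)

-- ===== LEMMAS AND PROOFS =====

theorem pvRed1_length : ∀ {l l' : List Char}, pvRed1 l = some l' → l'.length < l.length := by
  intro l
  induction l with
  | nil => intro l' h; simp [pvRed1] at h
  | cons a t ih =>
    intro l' h
    cases t with
    | nil => simp [pvRed1] at h
    | cons b u =>
      simp only [pvRed1] at h
      split at h
      · cases h; simp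
      · cases hr : pvRed1 (b :: u) with
        | none => rw [hr] at h; simp at h
        | some v =>
          rw [hr] at h
          simp at h
          subst h
          have := ih hr
          simp only [List.length_cons] at *
          omega

-- reversed-stack step, convenient for reasoning; related to pvStepA by reversal
def pvRStep (st : List Char) (c : Char) : List Char :=
  match st with
  | [] => [c]
  | h :: t => if h = c then t else c :: h :: t

theorem pvRStep_nil (c : Char) : pvRStep [] c = [c] := rfl

theorem pvRStep_chain {st : List Char} {c : Char}
    (h : List.IsChain (· ≠ ·) st) : List.IsChain (· ≠ ·) (pvRStep st c) := by
  cases st with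
  | nil => exact List.isChain_singleton c
  | cons a t =>
    simp only [pvRStep]
    split
    · exact h.tail
    · exact List.isChain_cons_cons.mpr ⟨Ne.symm (by assumption), h⟩

theorem pvRStep_cancel {st : List Char} {c : Char}
    (h : List.IsChain (· ≠ ·) st) : pvRStep (pvRStep st c) c = st := by
  cases st with
  | nil => simp [pvRStep]
  | cons a t =>
    by_cases hac : a = c
    · subst hac
      simp only [pvRStep]
      cases t with
      | nil => simp
      | cons b u =>
        have hab : a ≠ b := List.rel_of_isChain_cons_cons h
        simp [Ne.symm hab]
    · simp [pvRStep, hac]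

theorem pvStepA_eq_rev (st : List Char) (c : Char) :
    pvStepA st c = (pvRStep st.reverse c).reverse := by
  cases hr : st.reverse with
  | nil =>
    have : st = [] := by simpa using congrArg List.reverse hr
    subst this; simp [pvStepA, pvRStep]
  | cons h t =>
    have hst : st = t.reverse ++ [h] := by
      have := congrArg List.reverse hr; simpa using this
    subst hst
    by_cases hc : h = c
    · subst hc
      simp [pvStepA, pvRStep]
    · simp [pvStepA, pvRStep, hc]

theorem foldl_stepA_rev (l : List Char) : ∀ (st : List Char),
    l.foldl pvStepA st = (l.foldl pvRStep st.reverse).reverse := by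
  induction l with
  | nil => intro st; simp
  | cons a t ih =>
    intro st
    simp only [List.foldl_cons]
    rw [ih, pvStepA_eq_rev, List.reverse_reverse]

theorem foldl_rstep_red1 : ∀ (l l' : List Char), pvRed1 l = some l' →
    ∀ (st : List Char), List.IsChain (· ≠ ·) st →
      l.foldl pvRStep st = l'.foldl pvRStep st := by
  intro l
  induction l with
  | nil => intro l' h; simp [pvRed1] at h
  | cons a t ih =>
    intro l' h st hst
    cases t with
    | nil => simp [pvRed1] at h
    | cons b u =>
      simp only [pvRed1] at h
      split at h
      · rename_i hab; subst hab
        cases h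
        simp only [List.foldl_cons]
        rw [pvRStep_cancel hst]
      · cases hr : pvRed1 (b :: u) with
        | none => rw [hr] at h; simp at h
        | some v =>
          rw [hr] at h; simp at h
          subst h
          simp only [List.foldl_cons]
          exact ih v hr (pvRStep st a) (pvRStep_chain hst)

theorem red1_none_chain : ∀ {l : List Char}, pvRed1 l = none → List.IsChain (· ≠ ·) l := by
  intro l
  induction l with
  | nil => intro; exact List.isChain_nil
  | cons a t ih =>
    intro h
    cases t with
    | nil => exact List.isChain_singleton a
    | cons b u =>
      simp only [pvRed1] at h
      split at h
      · simp at h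
      · rename_i hab
        cases hr : pvRed1 (b :: u) with
        | none => exact List.isChain_cons_cons.mpr ⟨hab, ih hr⟩
        | some v => rw [hr] at h; simp at h

theorem foldl_rstep_chain : ∀ (l : List Char) (h : Char) (st : List Char),
    List.IsChain (· ≠ ·) (h :: l) →
      l.foldl pvRStep (h :: st) = l.reverse ++ h :: st := by
  intro l
  induction l with
  | nil => intro h st _; simp
  | cons c t ih =>
    intro h st hch
    have hhc : h ≠ c := List.rel_of_isChain_cons_cons hch
    simp only [List.foldl_cons, pvRStep, if_neg hhc]
    rw [ih c (h :: st) hch.tail]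
    simp

theorem reduceAux_foldl : ∀ (n : Nat) (l : List Char),
    (pvReduceAux n l).foldl pvRStep ([] : List Char) = l.foldl pvRStep ([] : List Char) := by
  intro n
  induction n with
  | zero => intro l; rfl
  | succ n ih =>
    intro l
    simp only [pvReduceAux]
    cases hr : pvRed1 l with
    | none => rfl
    | some l' => rw [ih l', foldl_rstep_red1 l l' hr [] List.isChain_nil]

theorem reduceAux_irred : ∀ (n : Nat) (l : List Char), l.length ≤ n →
    pvRed1 (pvReduceAux n l) = none := by
  intro n
  induction n with
  | zero =>
    intro l hl
    have : l = [] := List.length_eq_zero_iff.mp (Nat.le_zero.mp hl)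
    subst this; rfl
  | succ n ih =>
    intro l hl
    simp only [pvReduceAux]
    cases hr : pvRed1 l with
    | none => exact hr
    | some l' =>
      have := pvRed1_length hr
      exact ih l' (by omega)

-- for an irreducible list the stack run returns its reverse
theorem foldl_rstep_of_chain {l : List Char} (h : List.IsChain (· ≠ ·) l) :
    l.foldl pvRStep ([] : List Char) = l.reverse := by
  cases l with
  | nil => simp
  | cons c t =>
    simp only [List.foldl_cons, pvRStep_nil]
    rw [foldl_rstep_chain t c [] h]
    simp

theorem foldl_empty_iff (l : List Char) :
    l.foldl pvRStep ([] : List Char) = [] ↔ pvReduceFix l = [] := by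
  rw [← reduceAux_foldl l.length l]
  rw [foldl_rstep_of_chain (red1_none_chain (reduceAux_irred l.length l le_rfl))]
  unfold pvReduceFix
  simp

-- ===== VERDICT =====
theorem pracitce_spec : Claim_equal_pracitce := by
  intro s _ hpre
  unfold Spec_pracitce pracitce pracitce_alt
  cases hl : s.toList with
  | nil => exact absurd (String.toList_eq_nil_iff.mp hl) hpre
  | cons c rest =>
    simp only
    rw [foldl_stepA_rev]
    have key : rest.foldl pvRStep [c] = [] ↔ pvReduceFix (c :: rest) = [] := by
      simpa only [List.foldl_cons, pvRStep_nil] using foldl_empty_iff (c :: rest)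
    simp only [List.reverse_singleton]
    by_cases hx : rest.foldl pvRStep [c] = []
    · simp [hx, key.mp hx]
    · have hne : pvReduceFix (c :: rest) ≠ [] := fun h => hx (key.mpr h)
      simp [hx, hne]
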